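-- pv_equiv track=rewrite | github.com/Eli-Persky/cryptic-crossword-solver | app/langgraph_solver.py | _parse_component_response
-- ===== SOURCE A (Python) =====
-- from typing import Dict, Optional
--
-- def _parse_component_response(response_text: str) -> tuple[str, str, Optional[str], str]:
--     """Parse LLM response for component analysis."""
--     role = "unknown"
--     wordplay_type = "unknown"
--     result = None
--     description = "No description provided"
--
--     lines = response_text.split('\n')
--     for line in lines:
--         line = line.strip()
--         if line.startswith("Role:"):
--             role = line.replace("Role:", "").strip().lower()
--         elif line.startswith("Wordplay Type:"):
--             wordplay_type = line.replace("Wordplay Type:", "").strip().lower()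
--         elif line.startswith("Result:"):
--             result = line.replace("Result:", "").strip().upper()
--             if result == "":
--                 result = None
--         elif line.startswith("Description:"):
--             description = line.replace("Description:", "").strip().lower()
--
--     return role, wordplay_type, result, description
-- ===== SOURCE B (Python) =====
-- def _parse_component_response(response_text):
--     """Parse LLM response: for each field, search backwards for the last matching line."""
--     lines = [line.strip() for line in response_text.split('\n')]
--
--     def last_field(prefix):
--         for line in reversed(lines):
--             if line.startswith(prefix):
--                 return line.replace(prefix, "").strip()
--         return None
--
--     role = last_field("Role:")
--     wordplay = last_field("Wordplay Type:")
--     result = last_field("Result:")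
--     desc = last_field("Description:")
--     return (
--         role.lower() if role is not None else "unknown",
--         wordplay.lower() if wordplay is not None else "unknown",
--         (result.upper() or None) if result is not None else None,
--         desc.lower() if desc is not None else "No description provided",
--     )
-- ===== Notes on version B (the rewrite author's own statement) =====
-- stated objective: alternative
-- what changed: Replaces A's single forward pass mutating four result variables through an if/elif chain by four independent backward searches: each field is computed by scanning the stripped lines in reverse for the first (i.e. last-in-text) line with its prefix, which is correct because the prefixes are mutually non-overlapping so last-wins per field equals A's overwrite semantics.
import Mathlib
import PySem

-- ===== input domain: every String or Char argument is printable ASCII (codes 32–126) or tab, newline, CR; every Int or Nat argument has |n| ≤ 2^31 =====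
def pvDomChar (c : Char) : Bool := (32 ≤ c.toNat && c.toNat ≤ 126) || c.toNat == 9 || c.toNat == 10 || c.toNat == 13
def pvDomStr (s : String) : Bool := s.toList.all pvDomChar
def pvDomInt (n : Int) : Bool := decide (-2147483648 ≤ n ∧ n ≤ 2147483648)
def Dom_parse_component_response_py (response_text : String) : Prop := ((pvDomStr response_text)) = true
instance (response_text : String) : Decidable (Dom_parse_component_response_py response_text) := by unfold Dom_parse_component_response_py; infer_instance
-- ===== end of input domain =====

-- B replaces A's single forward pass over four mutable variables by four independent
-- backward searches (last matching line per field); same values, alternative decomposition.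

-- ===== PORT A =====
def pvStepA (st : String × String × Option String × String) (raw : String) :
    String × String × Option String × String :=
  let line := PySem.Str.strip raw
  if PySem.Str.startswith line "Role:" then
    (PySem.Str.lower (PySem.Str.strip (PySem.Str.replace line "Role:" "")), st.2.1, st.2.2.1, st.2.2.2)
  else if PySem.Str.startswith line "Wordplay Type:" then
    (st.1, PySem.Str.lower (PySem.Str.strip (PySem.Str.replace line "Wordplay Type:" "")), st.2.2.1, st.2.2.2)
  else if PySem.Str.startswith line "Result:" then
    let r := PySem.Str.upper (PySem.Str.strip (PySem.Str.replace line "Result:" ""))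
    (st.1, st.2.1, if r = "" then none else some r, st.2.2.2)
  else if PySem.Str.startswith line "Description:" then
    (st.1, st.2.1, st.2.2.1, PySem.Str.lower (PySem.Str.strip (PySem.Str.replace line "Description:" "")))
  else st

def parse_component_response_py (response_text : String) : String × String × Option String × String :=
  let lines := (PySem.Str.split? response_text "\n").getD []
  lines.foldl pvStepA ("unknown", "unknown", none, "No description provided")

-- ===== PORT B =====
-- backward search: first matching line of lines.reverse, its remainder stripped
def pvLastField (lines : List String) (pfx : String) : Option String :=
  (lines.reverse.find? (fun l => PySem.Str.startswith l pfx)).map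
    (fun l => PySem.Str.strip (PySem.Str.replace l pfx ""))

def parse_component_response_py_alt (response_text : String) : String × String × Option String × String :=
  let lines := ((PySem.Str.split? response_text "\n").getD []).map PySem.Str.strip
  let role := pvLastField lines "Role:"
  let wordplay := pvLastField lines "Wordplay Type:"
  let result := pvLastField lines "Result:"
  let desc := pvLastField lines "Description:"
  (match role with | some v => PySem.Str.lower v | none => "unknown",
   match wordplay with | some v => PySem.Str.lower v | none => "unknown",
   match result with
   | some v => let r := PySem.Str.upper v; if r = "" then none else some r
   | none => none,
   match desc with | some v => PySem.Str.lower v | none => "No description provided")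

-- ===== PRECONDITION & SPEC =====
def Spec_parse_component_response_py (response_text : String) (out : String × String × Option String × String) : Prop := out = parse_component_response_py_alt response_text
instance (response_text : String) (out : String × String × Option String × String) : Decidable (Spec_parse_component_response_py response_text out) := by unfold Spec_parse_component_response_py; infer_instance

-- ===== CLAIM =====
def Claim_equal_parse_component_response_py : Prop := ∀ (response_text : String), Dom_parse_component_response_py response_text → Spec_parse_component_response_py response_text (parse_component_response_py response_text)

-- ===== LEMMAS AND PROOFS =====

-- A's step on an already-stripped line (strip is idempotent is not needed; we factor the map out)
def pvStepS (st : String × String × Option String × String) (line : String) :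
    String × String × Option String × String :=
  if PySem.Str.startswith line "Role:" then
    (PySem.Str.lower (PySem.Str.strip (PySem.Str.replace line "Role:" "")), st.2.1, st.2.2.1, st.2.2.2)
  else if PySem.Str.startswith line "Wordplay Type:" then
    (st.1, PySem.Str.lower (PySem.Str.strip (PySem.Str.replace line "Wordplay Type:" "")), st.2.2.1, st.2.2.2)
  else if PySem.Str.startswith line "Result:" then
    let r := PySem.Str.upper (PySem.Str.strip (PySem.Str.replace line "Result:" ""))
    (st.1, st.2.1, if r = "" then none else some r, st.2.2.2)
  else if PySem.Str.startswith line "Description:" then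
    (st.1, st.2.1, st.2.2.1, PySem.Str.lower (PySem.Str.strip (PySem.Str.replace line "Description:" "")))
  else st

-- B's tuple as a function of the stripped line list
def pvExtract (lines : List String) : String × String × Option String × String :=
  (match pvLastField lines "Role:" with | some v => PySem.Str.lower v | none => "unknown",
   match pvLastField lines "Wordplay Type:" with | some v => PySem.Str.lower v | none => "unknown",
   match pvLastField lines "Result:" with
   | some v => let r := PySem.Str.upper v; if r = "" then none else some r
   | none => none,
   match pvLastField lines "Description:" with | some v => PySem.Str.lower v | none => "No description provided")

-- the four prefixes are pairwise non-prefixes of one another, so a line matches at most one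
theorem pvStarts_excl {s p q : String} (hpq : ¬ p.toList <+: q.toList) (hqp : ¬ q.toList <+: p.toList)
    (h : PySem.Str.startswith s p = true) : PySem.Str.startswith s q = false := by
  by_contra hq
  rw [Bool.not_eq_false] at hq
  simp only [PySem.Str.startswith_eq, PySem.Chars.startswith_iff] at h hq
  rcases List.prefix_or_prefix_of_prefix h hq with hc | hc
  · exact hpq hc
  · exact hqp hc

theorem pvLastField_append (L : List String) (l : String) (pfx : String) :
    pvLastField (L ++ [l]) pfx =
      if PySem.Str.startswith l pfx then some (PySem.Str.strip (PySem.Str.replace l pfx ""))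
      else pvLastField L pfx := by
  simp only [pvLastField, List.reverse_append, List.reverse_singleton, List.singleton_append,
    List.find?_cons]
  by_cases h : PySem.Str.startswith l pfx
  · simp [PySem.Str.startswith_eq] at h
    simp [h]
  · simp [PySem.Str.startswith_eq] at h
    simp [h]

theorem pvExtract_append (L : List String) (l : String) :
    pvExtract (L ++ [l]) = pvStepS (pvExtract L) l := by
  simp only [pvExtract, pvStepS, pvLastField_append]
  by_cases h1 : PySem.Str.startswith l "Role:"
  · have e2 := pvStarts_excl (by decide) (by decide) h1 (q := "Wordplay Type:")
    have e3 := pvStarts_excl (by decide) (by decide) h1 (q := "Result:")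
    have e4 := pvStarts_excl (by decide) (by decide) h1 (q := "Description:")
    simp [PySem.Str.startswith_eq] at h1 e2 e3 e4
    simp [h1, e2, e3, e4]
  · by_cases h2 : PySem.Str.startswith l "Wordplay Type:"
    · have e3 := pvStarts_excl (by decide) (by decide) h2 (q := "Result:")
      have e4 := pvStarts_excl (by decide) (by decide) h2 (q := "Description:")
      simp [PySem.Str.startswith_eq] at h1 h2 e3 e4
      simp [h1, h2, e3, e4]
    · by_cases h3 : PySem.Str.startswith l "Result:"
      · have e4 := pvStarts_excl (by decide) (by decide) h3 (q := "Description:")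
        simp [PySem.Str.startswith_eq] at h1 h2 h3 e4
        simp [h1, h2, h3, e4]
      · by_cases h4 : PySem.Str.startswith l "Description:"
        · simp [PySem.Str.startswith_eq] at h1 h2 h3 h4
          simp [h1, h2, h3, h4]
        · simp [PySem.Str.startswith_eq] at h1 h2 h3 h4
          simp [h1, h2, h3, h4]

theorem pvFold_eq_extract (L : List String) :
    L.foldl pvStepS ("unknown", "unknown", none, "No description provided") = pvExtract L := by
  induction L using List.reverseRecOn with
  | nil => rfl
  | append_singleton t l ih => rw [List.foldl_append, List.foldl_cons, List.foldl_nil, ih, pvExtract_append]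

-- ===== VERDICT =====
theorem parse_component_response_py_spec : Claim_equal_parse_component_response_py := by
  intro response_text _
  unfold Spec_parse_component_response_py parse_component_response_py parse_component_response_py_alt
  have hmap : ∀ (xs : List String) st, xs.foldl pvStepA st = (xs.map PySem.Str.strip).foldl pvStepS st := by
    intro xs st
    rw [List.foldl_map]
    rfl
  rw [hmap, pvFold_eq_extract]
  rfl
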